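-- pv_equiv track=rewrite | github.com/akramemrahnejad1992/financial_analysis_project- | statistics_calculator.py | calculate_event_statistics
-- ===== SOURCE A (Python) =====
-- from collections import defaultdict
--
-- def days_in_range(days_info, target_range):
--     return len([date for date in days_info.keys() if days_info[date][target_range]])
--
-- def days_break_event(days_info, target_range, event):
--     return len([date for date in days_info.keys() if days_info[date][target_range] and days_info[date][event]])
--
-- def days_break_any_events(days_info, target_range, event_1, event_2):
--     return len([date for date in days_info.keys() if days_info[date][target_range] and (days_info[date][event_1] or days_info[date][event_2])])
--
-- def days_break_all_events(days_info, target_range, event_1, event_2):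
--     return len([date for date in days_info.keys() if days_info[date][target_range] and (days_info[date][event_1] and days_info[date][event_2])])
--
-- def days_break_no_events(days_info, target_range, event_1, event_2):
--     return len([date for date in days_info.keys() if days_info[date][target_range] and (not days_info[date][event_1] and not days_info[date][event_2])])
--
-- def calculate_event_statistics(days_info, target_ranges, events):
--     event_info = defaultdict(lambda: {event: 0 for event in events})
--
--     for target_range in target_ranges:
--         event_info[target_range]['number_of_days'] = days_in_range(days_info, target_range)
--
--         for event in events[1:]:
--             event_info[target_range][event] = days_break_event(days_info, target_range, event)
--
--         for event_1, event_2 in [('break_on_high', 'break_on_low'), ('retest_on_vah', 'retest_on_val'), ('break_ib_high', 'break_ib_low')]: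
--             event_info[target_range][f'{event_1}_or_{event_2}'] = days_break_any_events(days_info, target_range, event_1, event_2)
--             event_info[target_range][f'{event_1}_and_{event_2}'] = days_break_all_events(days_info, target_range, event_1, event_2)
--             event_info[target_range][f'neither_{event_1}_nor_{event_2}'] = days_break_no_events(days_info, target_range, event_1, event_2)
--
--     return event_info
-- ===== SOURCE B (Python) =====
-- from collections import defaultdict
--
-- def calculate_event_statistics(days_info, target_ranges, events):
--     pairs = [('break_on_high', 'break_on_low'), ('retest_on_vah', 'retest_on_val'), ('break_ib_high', 'break_ib_low')]
--     event_info = defaultdict(lambda: {event: 0 for event in events})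
--     for target_range in target_ranges:
--         stats = event_info[target_range]
--         rows = [day for day in days_info.values() if day[target_range]]
--         stats['number_of_days'] = len(rows)
--         for event in events[1:]:
--             stats[event] = sum(1 for day in rows if day[event])
--         for event_1, event_2 in pairs:
--             n_or = n_and = n_nor = 0
--             for day in rows:
--                 b1, b2 = day[event_1], day[event_2]
--                 if b1 or b2:
--                     n_or += 1
--                 if b1 and b2:
--                     n_and += 1
--                 if not b1 and not b2:
--                     n_nor += 1
--             stats[f'{event_1}_or_{event_2}'] = n_or
--             stats[f'{event_1}_and_{event_2}'] = n_and
--             stats[f'neither_{event_1}_nor_{event_2}'] = n_nor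
--     return event_info
-- ===== Notes on version B (the rewrite author's own statement) =====
-- stated objective: simpler
-- what changed: Instead of A's five helper functions that each rescan all of days_info per statistic (re-testing the target-range condition every time), B filters the days matching the target range once per range and computes number_of_days, the per-event counts and the three fused or/and/neither pair counters from that row list.
import Mathlib
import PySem

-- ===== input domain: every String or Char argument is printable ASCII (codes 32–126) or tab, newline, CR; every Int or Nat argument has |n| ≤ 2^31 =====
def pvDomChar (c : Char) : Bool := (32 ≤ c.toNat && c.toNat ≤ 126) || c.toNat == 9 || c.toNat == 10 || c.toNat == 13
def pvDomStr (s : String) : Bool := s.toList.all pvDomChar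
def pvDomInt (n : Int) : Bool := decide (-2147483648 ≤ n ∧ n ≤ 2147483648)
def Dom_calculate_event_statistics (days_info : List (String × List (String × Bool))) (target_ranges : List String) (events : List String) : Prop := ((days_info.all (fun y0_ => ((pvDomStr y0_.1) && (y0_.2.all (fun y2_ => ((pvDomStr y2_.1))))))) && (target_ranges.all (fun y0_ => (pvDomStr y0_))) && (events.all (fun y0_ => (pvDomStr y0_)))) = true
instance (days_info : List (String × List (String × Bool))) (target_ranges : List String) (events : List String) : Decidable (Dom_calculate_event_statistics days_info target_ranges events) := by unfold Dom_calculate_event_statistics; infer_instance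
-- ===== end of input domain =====

-- B replaces A's five per-statistic full scans of days_info by one filter of the matching
-- rows per target range and counts over those rows (objective: simpler/alternative).


-- ===== PORT A =====
-- days_info[date] : KeyError (missing date) cannot happen for dates taken from keys(); getD [] is never used there
def pvDayA (days_info : List (String × List (String × Bool))) (date : String) : PySem.Dict String Bool :=
  PySem.Dict.mk (((PySem.Dict.mk days_info).get? date).getD [])

-- day[k] : a missing key is a Python KeyError, excluded by Pre_; getD false is exact inside Pre_
def pvGetA (d : PySem.Dict String Bool) (k : String) : Bool := (d.get? k).getD false

def days_in_range (days_info : List (String × List (String × Bool))) (target_range : String) : Int :=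
  (((PySem.Dict.mk days_info).keys).filter
    (fun date => pvGetA (pvDayA days_info date) target_range)).length

def days_break_event (days_info : List (String × List (String × Bool))) (target_range event : String) : Int :=
  (((PySem.Dict.mk days_info).keys).filter
    (fun date => pvGetA (pvDayA days_info date) target_range && pvGetA (pvDayA days_info date) event)).length

def days_break_any_events (days_info : List (String × List (String × Bool))) (target_range event_1 event_2 : String) : Int :=
  (((PySem.Dict.mk days_info).keys).filter
    (fun date => pvGetA (pvDayA days_info date) target_range &&
      (pvGetA (pvDayA days_info date) event_1 || pvGetA (pvDayA days_info date) event_2))).length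

def days_break_all_events (days_info : List (String × List (String × Bool))) (target_range event_1 event_2 : String) : Int :=
  (((PySem.Dict.mk days_info).keys).filter
    (fun date => pvGetA (pvDayA days_info date) target_range &&
      (pvGetA (pvDayA days_info date) event_1 && pvGetA (pvDayA days_info date) event_2))).length

def days_break_no_events (days_info : List (String × List (String × Bool))) (target_range event_1 event_2 : String) : Int :=
  (((PySem.Dict.mk days_info).keys).filter
    (fun date => pvGetA (pvDayA days_info date) target_range &&
      (!pvGetA (pvDayA days_info date) event_1 && !pvGetA (pvDayA days_info date) event_2))).length

def pvPairs : List (String × String) :=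
  [("break_on_high", "break_on_low"), ("retest_on_vah", "retest_on_val"), ("break_ib_high", "break_ib_low")]

def calculate_event_statistics (days_info : List (String × List (String × Bool))) (target_ranges : List String) (events : List String) : List (String × List (String × Int)) :=
  -- defaultdict(lambda: {event: 0 for event in events})
  let factory : PySem.Dict String Int := events.foldl (fun d e => d.insert e 0) PySem.Dict.empty
  let event_info : PySem.Dict String (PySem.Dict String Int) :=
    target_ranges.foldl (fun ev target_range =>
      let cur := ev.getD target_range factory          -- defaultdict access event_info[target_range]
      let cur := cur.insert "number_of_days" (days_in_range days_info target_range)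
      let cur := (PySem.List.slice events (some 1) none).foldl
        (fun c event => c.insert event (days_break_event days_info target_range event)) cur
      let cur := pvPairs.foldl (fun c p =>
        let c := c.insert (p.1 ++ "_or_" ++ p.2) (days_break_any_events days_info target_range p.1 p.2)
        let c := c.insert (p.1 ++ "_and_" ++ p.2) (days_break_all_events days_info target_range p.1 p.2)
        c.insert ("neither_" ++ p.1 ++ "_nor_" ++ p.2) (days_break_no_events days_info target_range p.1 p.2)) cur
      ev.insert target_range cur) PySem.Dict.empty
  event_info.items.map (fun p => (p.1, p.2.items))

-- ===== PORT B =====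
-- day[k] on a raw day list; missing key (KeyError) excluded by Pre_
def pvGetB (day : List (String × Bool)) (k : String) : Bool := ((PySem.Dict.mk day).get? k).getD false

def calculate_event_statistics_alt (days_info : List (String × List (String × Bool))) (target_ranges : List String) (events : List String) : List (String × List (String × Int)) :=
  let factory : PySem.Dict String Int := events.foldl (fun d e => d.insert e 0) PySem.Dict.empty
  let event_info : PySem.Dict String (PySem.Dict String Int) :=
    target_ranges.foldl (fun ev target_range =>
      let stats := ev.getD target_range factory
      let rows := ((PySem.Dict.mk days_info).values).filter (fun day => pvGetB day target_range)
      let stats := stats.insert "number_of_days" (rows.length : Int)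
      let stats := (PySem.List.slice events (some 1) none).foldl
        (fun c event => c.insert event
          (rows.foldl (fun n day => if pvGetB day event then n + 1 else n) (0 : Int))) stats
      let stats := pvPairs.foldl (fun c p =>
        let t := rows.foldl (fun acc day =>
            let b1 := pvGetB day p.1
            let b2 := pvGetB day p.2
            ((if b1 || b2 then acc.1 + 1 else acc.1),
             (if b1 && b2 then acc.2.1 + 1 else acc.2.1),
             (if !b1 && !b2 then acc.2.2 + 1 else acc.2.2))) ((0 : Int), (0 : Int), (0 : Int))
        let c := c.insert (p.1 ++ "_or_" ++ p.2) t.1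
        let c := c.insert (p.1 ++ "_and_" ++ p.2) t.2.1
        c.insert ("neither_" ++ p.1 ++ "_nor_" ++ p.2) t.2.2) stats
      ev.insert target_range stats) PySem.Dict.empty
  event_info.items.map (fun p => (p.1, p.2.items))

-- ===== PRECONDITION & SPEC =====
-- Pre_ excludes (a) duplicate date keys, impossible for a real Python dict (the assoc-list encoding's
-- accidental corner), and (b) exactly the inputs where A raises KeyError: some day dict missing a
-- target range, or — when that day lies in some target range — missing one of events[1:] or of the
-- six fixed event names.
def Pre_calculate_event_statistics (days_info : List (String × List (String × Bool))) (target_ranges : List String) (events : List String) : Prop :=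
  (days_info.map Prod.fst).Nodup ∧
  ∀ p ∈ days_info,
    (∀ tr ∈ target_ranges, (PySem.Dict.mk p.2).contains tr = true) ∧
    ((∃ tr ∈ target_ranges, ((PySem.Dict.mk p.2).get? tr).getD false = true) →
      (∀ e ∈ events.tail, (PySem.Dict.mk p.2).contains e = true) ∧
      (∀ e ∈ ["break_on_high", "break_on_low", "retest_on_vah", "retest_on_val", "break_ib_high", "break_ib_low"],
        (PySem.Dict.mk p.2).contains e = true))
instance (days_info : List (String × List (String × Bool))) (target_ranges : List String) (events : List String) : Decidable (Pre_calculate_event_statistics days_info target_ranges events) := by unfold Pre_calculate_event_statistics; infer_instance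

def pvWitness_calculate_event_statistics : (List (String × List (String × Bool))) × List String × List String :=
  ([("d1", [("r", true), ("break_on_high", true), ("break_on_low", false), ("retest_on_vah", false),
            ("retest_on_val", true), ("break_ib_high", false), ("break_ib_low", false), ("e", true)]),
    ("d2", [("r", false)])],
   ["r"], ["date", "e"])

def Spec_calculate_event_statistics (days_info : List (String × List (String × Bool))) (target_ranges : List String) (events : List String) (out : List (String × List (String × Int))) : Prop := out = calculate_event_statistics_alt days_info target_ranges events
instance (days_info : List (String × List (String × Bool))) (target_ranges : List String) (events : List String) (out : List (String × List (String × Int))) : Decidable (Spec_calculate_event_statistics days_info target_ranges events out) := by unfold Spec_calculate_event_statistics; infer_instance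

-- ===== CLAIM (what is proved, stated in full; the proofs are below) =====
def Claim_equal_calculate_event_statistics : Prop := ∀ (days_info : List (String × List (String × Bool))) (target_ranges : List String) (events : List String), Dom_calculate_event_statistics days_info target_ranges events → Pre_calculate_event_statistics days_info target_ranges events → Spec_calculate_event_statistics days_info target_ranges events (calculate_event_statistics days_info target_ranges events)

-- ===== LEMMAS AND PROOFS =====

-- A's scan over days_info.keys() with a dict lookup equals the scan over the values, given unique dates
lemma pv_count_keys_values (l : List (String × List (String × Bool)))
    (hnd : (l.map Prod.fst).Nodup) (P : List (String × Bool) → Bool) :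
    ((l.map Prod.fst).filter (fun date => P (((PySem.Dict.mk l).get? date).getD []))).length
      = ((l.map Prod.snd).filter P).length := by
  induction l with
  | nil => simp
  | cons hd t ih =>
    obtain ⟨d, day⟩ := hd
    simp only [List.map_cons, List.nodup_cons] at hnd ⊢
    obtain ⟨hdn, hnd'⟩ := hnd
    rw [List.filter_cons, List.filter_cons]
    have hself : (((PySem.Dict.mk ((d, day) :: t)).get? d).getD []) = day := by
      rw [PySem.Dict.get?_mk_cons]; simp
    have htail : (t.map Prod.fst).filter
        (fun date => P (((PySem.Dict.mk ((d, day) :: t)).get? date).getD []))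
        = (t.map Prod.fst).filter (fun date => P (((PySem.Dict.mk t).get? date).getD [])) := by
      apply List.filter_congr
      intro date hmem
      have hne : (d == date) = false := by
        simp only [beq_eq_false_iff_ne]
        rintro rfl; exact hdn hmem
      rw [PySem.Dict.get?_mk_cons, hne]; simp
    rw [hself, htail]
    by_cases h : P day = true
    · simp [h, ih hnd']
    · simp [h, ih hnd']

-- the fused three-counter loop of B, split into three filtered counts
lemma pv_triple_fold (rows : List (List (String × Bool))) (f1 f2 f3 : List (String × Bool) → Bool)
    (a b c : Int) :
    rows.foldl (fun acc day =>
        ((if f1 day then acc.1 + 1 else acc.1),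
         (if f2 day then acc.2.1 + 1 else acc.2.1),
         (if f3 day then acc.2.2 + 1 else acc.2.2))) (a, b, c)
      = (a + (rows.filter f1).length, b + (rows.filter f2).length, c + (rows.filter f3).length) := by
  induction rows generalizing a b c with
  | nil => simp
  | cons hd t ih =>
    simp only [List.foldl_cons, List.filter_cons, ih]
    split_ifs <;> simp_all <;> omega

-- A's filtered-keys count equals B's count over the pre-filtered rows
lemma pv_count_eq (days_info : List (String × List (String × Bool)))
    (hnd : (days_info.map Prod.fst).Nodup) (tr : String) (Q : List (String × Bool) → Bool) :
    ((((PySem.Dict.mk days_info).keys).filter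
        (fun date => pvGetA (pvDayA days_info date) tr && Q (((PySem.Dict.mk days_info).get? date).getD []))).length : Int)
      = (((((PySem.Dict.mk days_info).values).filter (fun day => pvGetB day tr)).filter Q).length : Int) := by
  have hk : (PySem.Dict.mk days_info).keys = days_info.map Prod.fst := rfl
  have hv : (PySem.Dict.mk days_info).values = days_info.map Prod.snd := rfl
  rw [hk, hv, List.filter_filter]
  have := pv_count_keys_values days_info hnd (fun day => Q day && pvGetB day tr)
  have hcong : ((days_info.map Prod.fst).filter
      (fun date => pvGetA (pvDayA days_info date) tr && Q (((PySem.Dict.mk days_info).get? date).getD [])))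
      = ((days_info.map Prod.fst).filter
      (fun date => (fun day => Q day && pvGetB day tr) (((PySem.Dict.mk days_info).get? date).getD []))) := by
    apply List.filter_congr
    intro date _
    simp only [pvGetA, pvDayA, pvGetB, Bool.and_comm]
  rw [hcong, this]

set_option maxHeartbeats 1000000 in
theorem pv_main (days_info : List (String × List (String × Bool))) (target_ranges : List String)
    (events : List String) (hnd : (days_info.map Prod.fst).Nodup) :
    calculate_event_statistics days_info target_ranges events
      = calculate_event_statistics_alt days_info target_ranges events := by
  simp only [calculate_event_statistics, calculate_event_statistics_alt]
  refine congrArg (fun d : PySem.Dict String (PySem.Dict String Int) => d.items.map (fun p => (p.1, p.2.items))) ?_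
  apply PySem.List.foldl_congr_mem
  intro ev tr _
  refine congrArg (ev.insert tr) ?_
  -- rows abbreviation
  set rows := ((PySem.Dict.mk days_info).values).filter (fun day => pvGetB day tr) with hrows
  have hnum : days_in_range days_info tr = (rows.length : Int) := by
    have := pv_count_eq days_info hnd tr (fun _ => true)
    simpa [days_in_range, List.filter_true] using this
  rw [hnum]
  -- events[1:] loop
  have hev : ∀ (c : PySem.Dict String Int),
      (PySem.List.slice events (some 1) none).foldl
        (fun c event => c.insert event (days_break_event days_info tr event)) c
      = (PySem.List.slice events (some 1) none).foldl
        (fun c event => c.insert event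
          (rows.foldl (fun n day => if pvGetB day event then n + 1 else n) (0 : Int))) c := by
    intro c
    apply PySem.List.foldl_congr_mem
    intro acc e _
    congr 1
    rw [PySem.List.foldl_count_if (fun day => pvGetB day e) rows 0]
    have h := pv_count_eq days_info hnd tr (fun day => pvGetB day e)
    simp only [days_break_event, pvGetA, pvDayA, pvGetB] at h hrows ⊢
    rw [h, hrows, List.countP_eq_length_filter]
    omega
  rw [hev]
  -- pairs loop
  apply PySem.List.foldl_congr_mem
  intro c p _
  rw [pv_triple_fold rows (fun day => pvGetB day p.1 || pvGetB day p.2)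
        (fun day => pvGetB day p.1 && pvGetB day p.2)
        (fun day => !pvGetB day p.1 && !pvGetB day p.2) 0 0 0]
  have h1 := pv_count_eq days_info hnd tr (fun day => pvGetB day p.1 || pvGetB day p.2)
  have h2 := pv_count_eq days_info hnd tr (fun day => pvGetB day p.1 && pvGetB day p.2)
  have h3 := pv_count_eq days_info hnd tr (fun day => !pvGetB day p.1 && !pvGetB day p.2)
  simp only [days_break_any_events, days_break_all_events, days_break_no_events, pvGetA, pvDayA, pvGetB] at h1 h2 h3 hrows ⊢
  rw [h1, h2, h3, hrows]
  simp

-- ===== VERDICT (by name: the statement is the Claim_ definition above) =====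
theorem calculate_event_statistics_spec : Claim_equal_calculate_event_statistics := by
  intro days_info target_ranges events _ hpre
  unfold Spec_calculate_event_statistics
  exact pv_main days_info target_ranges events hpre.1
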